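-- pv_equiv track=rewrite | github.com/wilsondesouza/desafios-logica-godot | calculadora-partidas/ranqueadas.py | calcular_nivel
-- ===== SOURCE A (Python) =====
-- def calcular_nivel(vitorias, derrotas):
--     saldo_vitorias = vitorias - derrotas
--
--     niveis = [
--         (10, "Ferro"),
--         (21, "Bronze"),
--         (51, "Prata"),
--         (81, "Ouro"),
--         (91, "Diamante"),
--         (101, "Lendário")
--     ]
--
--     nivel = "Imortal"
--
--     for limite, nome_nivel in niveis:
--         if vitorias < limite:
--             nivel = nome_nivel
--             break
--
--     return saldo_vitorias, nivel
-- ===== SOURCE B (Python) =====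
-- def calcular_nivel(vitorias, derrotas):
--     thresholds = [10, 21, 51, 81, 91, 101]
--     names = ["Ferro", "Bronze", "Prata", "Ouro", "Diamante", "Lendário", "Imortal"]
--     lo, hi = 0, len(thresholds)
--     while lo < hi:
--         mid = (lo + hi) // 2
--         if vitorias < thresholds[mid]:
--             hi = mid
--         else:
--             lo = mid + 1
--     return vitorias - derrotas, names[lo]
-- ===== Notes on version B (the rewrite author's own statement) =====
-- stated objective: alternative
-- what changed: Replaced the linear for/break scan over (threshold, name) pairs with a hand-written binary search (bisect_right) over a threshold array indexing a parallel name array.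
import Mathlib
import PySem

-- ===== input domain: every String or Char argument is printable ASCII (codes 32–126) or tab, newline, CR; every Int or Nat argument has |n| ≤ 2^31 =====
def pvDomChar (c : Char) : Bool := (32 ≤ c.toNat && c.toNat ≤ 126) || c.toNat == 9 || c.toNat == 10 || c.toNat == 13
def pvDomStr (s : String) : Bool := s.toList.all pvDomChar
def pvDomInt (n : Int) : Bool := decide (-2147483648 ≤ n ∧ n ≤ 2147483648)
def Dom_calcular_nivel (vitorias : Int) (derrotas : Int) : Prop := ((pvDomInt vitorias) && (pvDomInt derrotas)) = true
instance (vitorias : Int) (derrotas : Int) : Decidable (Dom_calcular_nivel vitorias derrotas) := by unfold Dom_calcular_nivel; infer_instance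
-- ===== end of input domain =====

-- B replaces A's linear for/break scan over (threshold, name) pairs with a binary
-- search over a threshold array indexing a parallel name array (alternative strategy).

-- ===== PORT A =====
-- the for/break loop: first pair with vitorias < limite wins, else the initial "Imortal"
def pvLoopA (vitorias : Int) : List (Int × String) → String → String
  | [], nivel => nivel
  | (limite, nome) :: rest, nivel =>
      if vitorias < limite then nome else pvLoopA vitorias rest nivel

def calcular_nivel (vitorias : Int) (derrotas : Int) : Int × String :=
  let saldo_vitorias := vitorias - derrotas
  let niveis : List (Int × String) :=
    [(10, "Ferro"), (21, "Bronze"), (51, "Prata"), (81, "Ouro"), (91, "Diamante"), (101, "Lendário")]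
  (saldo_vitorias, pvLoopA vitorias niveis "Imortal")

-- ===== PORT B =====
-- the while lo < hi binary-search loop of Source B (bisect_right by hand)
def pvBisect (vitorias : Int) (ts : List Int) (lo hi : Nat) : Nat :=
  if lo < hi then
    let mid := (lo + hi) / 2
    if vitorias < ts.getD mid 0 then pvBisect vitorias ts lo mid
    else pvBisect vitorias ts (mid + 1) hi
  else lo
termination_by hi - lo
decreasing_by all_goals omega

def calcular_nivel_alt (vitorias : Int) (derrotas : Int) : Int × String :=
  let thresholds : List Int := [10, 21, 51, 81, 91, 101]
  let names : List String := ["Ferro", "Bronze", "Prata", "Ouro", "Diamante", "Lendário", "Imortal"]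
  (vitorias - derrotas, names.getD (pvBisect vitorias thresholds 0 thresholds.length) "")

-- ===== PRECONDITION & SPEC =====
def Spec_calcular_nivel (vitorias : Int) (derrotas : Int) (out : Int × String) : Prop := out = calcular_nivel_alt vitorias derrotas
instance (vitorias : Int) (derrotas : Int) (out : Int × String) : Decidable (Spec_calcular_nivel vitorias derrotas out) := by unfold Spec_calcular_nivel; infer_instance

-- ===== CLAIM (what is proved, stated in full; the proofs are below) =====
def Claim_equal_calcular_nivel : Prop := ∀ (vitorias : Int) (derrotas : Int), Dom_calcular_nivel vitorias derrotas → Spec_calcular_nivel vitorias derrotas (calcular_nivel vitorias derrotas)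

-- ===== LEMMAS AND PROOFS =====

-- ===== VERDICT (by name: the statement is the Claim_ definition above) =====
theorem calcular_nivel_spec : Claim_equal_calcular_nivel := by
  intro v d _
  unfold Spec_calcular_nivel calcular_nivel calcular_nivel_alt
  by_cases h1 : v < 10 <;> by_cases h2 : v < 21 <;> by_cases h3 : v < 51 <;>
    by_cases h4 : v < 81 <;> by_cases h5 : v < 91 <;> by_cases h6 : v < 101 <;>
    first
      | (exfalso; omega)
      | simp [pvLoopA, pvBisect, h1, h2, h3, h4, h5, h6]
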